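-- pv_equiv track=rewrite | github.com/nogibjj/news_sentiment_analysis | ngram.py | all_possible_words
-- ===== SOURCE A (Python) =====
-- def dictionary_to_list(dict):
--     result = []
--     for key, value in dict.items():
--         result.extend([key] * value)
--     return result
--
-- def generate_n_grams(corpus, n):  # DONE i think
--     """function breaking up corpus into n-grams"""
--     n_gram_list = []
--     if len(corpus) < n:
--         return n_gram_list
--     for i in range(len(corpus) - n + 1):
--         n_gram = corpus[i : i + n]
--         n_gram_list.append(n_gram)
--         pass
--     return n_gram_list
--
-- def relevant_n_grams(words, n, corpus):  # DONE I think
--     """function that returns all n-grams in corpus that start with words"""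
--     all_grams = generate_n_grams(corpus, n)
--     wordsofinterest = words[1 - n :]
--     # get n-grams starting with words
--     matching_n_grams = [
--         n_gram for n_gram in all_grams if n_gram[: (n - 1)] == wordsofinterest
--     ]
--     return matching_n_grams
--
-- def create_dict(words, n, corpus):  # DONE I think
--     """creates a dictionary of all n-grams beginning with words"""
--     worddict = {}
--     # find all instances of words in corpus
--     relevant = relevant_n_grams(words, n, corpus)
--     # create dictionary of the following word as key and number of occurances as value
--     if relevant == []:
--         return worddict
--     else:
--         for n_gram in relevant:
--             currkey = n_gram[-1]
--             if currkey in worddict.keys():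
--                 worddict[currkey] += 1
--             else:
--                 worddict[currkey] = 1
--     return worddict
--
-- def all_possible_words(words, corpus):  # NOTDONE
--     """creates a list of the words that complete all n-grams in corpus that start with words, including backoff"""
--     new_words = []
--     n = len(words) + 1
--     while new_words == []:
--         if n == 1:
--             words = []
--         else:
--             pass
--         worddict = create_dict(words, n, corpus)
--         if len(worddict) > 0:
--             # append all the possible endings
--             new_words = dictionary_to_list(worddict)
--         else:
--             # do stupid backoff
--             n = n - 1
--     return new_words
-- ===== SOURCE B (Python) =====
-- def all_possible_words(words, corpus):
--     """Match-length profile: prof[j] is the length of the longest suffix of `words`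
--     that matches the corpus immediately before position j; the deepest reachable
--     backoff level is max(prof), and the completions are the tokens at the
--     positions attaining it, tallied in corpus order."""
--     L = len(words)
--     prof = []
--     for j in range(len(corpus)):
--         k = 0
--         while k < L and k < j and corpus[j - 1 - k] == words[L - 1 - k]:
--             k += 1
--         prof.append(k)
--     best = max(prof)
--     counts = {}
--     for j in range(len(corpus)):
--         if prof[j] >= best:
--             w = corpus[j]
--             counts[w] = counts.get(w, 0) + 1
--     return [w for w, c in counts.items() for _ in range(c)]
-- ===== Notes on version B (the rewrite author's own statement) =====
-- stated objective: faster
-- what changed: A repeatedly re-scans the corpus with a descending backoff loop (materialise all n-grams, filter against the context, re-count) until some level matches; B has no backoff loop at all: it computes a match-length profile (for every corpus position, the length of the longest suffix of `words` ending just before it) in one pass, takes the profile's maximum as the backoff level, and tallies the tokens at the positions attaining it.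
-- outside the precondition, e.g. on all_possible_words(['a'], []): A raises IndexError, B raises ValueError
import Mathlib
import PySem

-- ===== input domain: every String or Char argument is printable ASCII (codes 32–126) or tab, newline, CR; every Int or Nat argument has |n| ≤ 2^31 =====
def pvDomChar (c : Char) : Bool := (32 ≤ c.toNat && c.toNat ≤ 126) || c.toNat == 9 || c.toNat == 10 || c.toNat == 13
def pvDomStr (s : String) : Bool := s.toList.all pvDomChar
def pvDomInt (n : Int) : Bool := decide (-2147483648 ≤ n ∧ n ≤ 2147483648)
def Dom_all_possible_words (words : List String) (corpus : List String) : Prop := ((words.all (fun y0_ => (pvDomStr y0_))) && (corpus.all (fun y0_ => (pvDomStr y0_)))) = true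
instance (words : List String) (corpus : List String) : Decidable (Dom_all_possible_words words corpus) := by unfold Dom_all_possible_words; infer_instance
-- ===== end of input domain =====

-- B replaces A's descending-backoff rescans (all n-grams materialised and filtered per level)
-- by a single match-length profile of the corpus: for every position, how long a suffix of
-- `words` ends there; the maximum is the backoff level and the tokens attaining it are tallied
-- (objective: faster, measured).


-- ===== PORT A =====
-- result.extend([key] * value): List.replicate value.toNat is exact ([] for value ≤ 0)
def dictionary_to_list (d : PySem.Dict String Int) : List String :=
  d.items.foldl (fun result kv => result ++ List.replicate kv.2.toNat kv.1) []

def generate_n_grams (corpus : List String) (n : Int) : List (List String) :=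
  if (corpus.length : Int) < n then []
  else (PySem.List.pyRange 0 ((corpus.length : Int) - n + 1) 1).foldl
    (fun acc i => acc ++ [PySem.List.slice corpus (some i) (some (i + n))]) []

def relevant_n_grams (words : List String) (n : Int) (corpus : List String) : List (List String) :=
  let all_grams := generate_n_grams corpus n
  let wordsofinterest := PySem.List.slice words (some (1 - n)) none
  all_grams.filter (fun n_gram => PySem.List.slice n_gram none (some (n - 1)) == wordsofinterest)

def create_dict (words : List String) (n : Int) (corpus : List String) : PySem.Dict String Int :=
  let relevant := relevant_n_grams words n corpus
  if relevant == [] then PySem.Dict.empty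
  else relevant.foldl (fun worddict n_gram =>
    match PySem.List.pyGet? n_gram (-1) with    -- n_gram[-1]; none = IndexError, unreachable: matched grams have length n ≥ 1
    | some currkey =>
        if worddict.contains currkey then worddict.insert currkey (worddict.getD currkey 0 + 1)
        else worddict.insert currkey 1
    | none => worddict) PySem.Dict.empty

-- the while loop of A; the counter n is passed as a Nat, starting at len(words)+1 and
-- decremented exactly as in Python.  At n = 0 Python raises IndexError (only reachable for
-- corpus = [], excluded by Pre_); the port returns [] there.
def apw_loop (words : List String) (corpus : List String) : Nat → List String
  | 0 => []
  | Nat.succ m =>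
    let n : Int := (m : Int) + 1
    let words' := if n == 1 then [] else words
    let worddict := create_dict words' n corpus
    if worddict.size > 0 then dictionary_to_list worddict
    else apw_loop words corpus m

def all_possible_words (words : List String) (corpus : List String) : List String :=
  apw_loop words corpus (words.length + 1)

-- ===== PORT B =====
-- the inner while loop of B: grow the match length k while the suffix of `words` of
-- length k+1 still matches the corpus just before position j
def apw_prof_match (words corpus : List String) (j L : Int) (k : Nat) : Nat :=
  if h : (k : Int) < L ∧ (k : Int) < j ∧
      PySem.List.pyGetD corpus (j - 1 - (k : Int)) "" = PySem.List.pyGetD words (L - 1 - (k : Int)) "" then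
    apw_prof_match words corpus j L (k + 1)
  else k
termination_by (L - (k : Int)).toNat
decreasing_by
  obtain ⟨h1, -, -⟩ := h
  push_cast
  omega

def all_possible_words_alt (words : List String) (corpus : List String) : List String :=
  let L : Int := (words.length : Int)
  let prof : List Nat := (PySem.List.pyRange 0 ((corpus.length : Int)) 1).foldl
    (fun acc j => acc ++ [apw_prof_match words corpus j L 0]) []
  match PySem.List.max? prof (fun x => x) with
  | none => []          -- max([]): ValueError in Python; corpus = [] is outside Pre_
  | some best =>
    let counts := (PySem.List.pyRange 0 ((corpus.length : Int)) 1).foldl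
      (fun counts j =>
        if best ≤ PySem.List.pyGetD prof j 0 then
          let w := PySem.List.pyGetD corpus j ""
          counts.insert w (counts.getD w 0 + 1)
        else counts) PySem.Dict.empty
    counts.items.flatMap (fun kv => (PySem.List.pyRange 0 kv.2 1).map (fun _ => kv.1))

-- ===== PRECONDITION & SPEC =====
-- Pre_ excludes corpus = [], on which the Python A backs off past n = 1 and raises IndexError
-- (and B's max() raises ValueError).
def Pre_all_possible_words (_words : List String) (corpus : List String) : Prop := corpus ≠ []
instance (words : List String) (corpus : List String) : Decidable (Pre_all_possible_words words corpus) := by unfold Pre_all_possible_words; infer_instance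
def pvWitness_all_possible_words : List String × List String := (["a"], ["a", "b", "a", "c"])

def Spec_all_possible_words (words : List String) (corpus : List String) (out : List String) : Prop := out = all_possible_words_alt words corpus
instance (words : List String) (corpus : List String) (out : List String) : Decidable (Spec_all_possible_words words corpus out) := by unfold Spec_all_possible_words; infer_instance

-- ===== CLAIM (what is proved, stated in full; the proofs are below) =====
def Claim_equal_all_possible_words : Prop := ∀ (words : List String) (corpus : List String), Dom_all_possible_words words corpus → Pre_all_possible_words words corpus → Spec_all_possible_words words corpus (all_possible_words words corpus)

-- ===== LEMMAS AND PROOFS =====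

-- A's per-level corpus scan (proof-side intermediate form of create_dict)
def scanLevel (ctx : List String) (corpus : List String) (k : Nat) : PySem.Dict String Int :=
  (PySem.List.pyRange 0 ((corpus.length : Int) - (k : Int)) 1).foldl
    (fun counts i =>
      if PySem.List.slice corpus (some i) (some (i + (k : Int))) == ctx then
        let w := PySem.List.pyGetD corpus (i + (k : Int)) ""
        counts.insert w (counts.getD w 0 + 1)
      else counts) PySem.Dict.empty

-- the match length computed by B at position j
def pvM (words corpus : List String) (j : Nat) : Nat :=
  apw_prof_match words corpus (j : Int) (words.length : Int) 0

-- elementwise agreement of the last k words with the corpus just before position j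
def pvAgree (words corpus : List String) (j k : Nat) : Prop :=
  ∀ t, t < k → corpus.getD (j - 1 - t) "" = words.getD (words.length - 1 - t) ""

-- the tokens completing a context of length k, in corpus order
def pvKeys (words corpus : List String) (k : Nat) : List String :=
  ((List.range corpus.length).filter (fun j => k ≤ pvM words corpus j)).map
    (fun j => corpus.getD j "")

def pvCountFold (l : List String) : PySem.Dict String Int :=
  l.foldl (fun d w => d.insert w (d.getD w 0 + 1)) PySem.Dict.empty

lemma pyGetD_int_sub (xs : List String) (j k : Nat) (h : k < j) :
    PySem.List.pyGetD xs ((j : Int) - 1 - (k : Int)) "" = xs.getD (j - 1 - k) "" := by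
  have : (j : Int) - 1 - (k : Int) = ((j - 1 - k : Nat) : Int) := by omega
  rw [this, PySem.List.pyGetD_natCast]

lemma pvMatch_spec (words corpus : List String) (j k0 : Nat)
    (hL : k0 ≤ words.length) (hj : k0 ≤ j) (ha : pvAgree words corpus j k0) :
    k0 ≤ apw_prof_match words corpus (j : Int) (words.length : Int) k0 ∧
    apw_prof_match words corpus (j : Int) (words.length : Int) k0 ≤ words.length ∧
    apw_prof_match words corpus (j : Int) (words.length : Int) k0 ≤ j ∧
    pvAgree words corpus j (apw_prof_match words corpus (j : Int) (words.length : Int) k0) ∧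
    (apw_prof_match words corpus (j : Int) (words.length : Int) k0 = words.length ∨
     apw_prof_match words corpus (j : Int) (words.length : Int) k0 = j ∨
     corpus.getD (j - 1 - apw_prof_match words corpus (j : Int) (words.length : Int) k0) "" ≠
       words.getD (words.length - 1 - apw_prof_match words corpus (j : Int) (words.length : Int) k0) "") := by
  suffices h : ∀ n k0, words.length - k0 ≤ n → k0 ≤ words.length → k0 ≤ j → pvAgree words corpus j k0 →
      k0 ≤ apw_prof_match words corpus (j : Int) (words.length : Int) k0 ∧
      apw_prof_match words corpus (j : Int) (words.length : Int) k0 ≤ words.length ∧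
      apw_prof_match words corpus (j : Int) (words.length : Int) k0 ≤ j ∧
      pvAgree words corpus j (apw_prof_match words corpus (j : Int) (words.length : Int) k0) ∧
      (apw_prof_match words corpus (j : Int) (words.length : Int) k0 = words.length ∨
       apw_prof_match words corpus (j : Int) (words.length : Int) k0 = j ∨
       corpus.getD (j - 1 - apw_prof_match words corpus (j : Int) (words.length : Int) k0) "" ≠
         words.getD (words.length - 1 - apw_prof_match words corpus (j : Int) (words.length : Int) k0) "") by
    exact h (words.length - k0) k0 le_rfl hL hj ha
  intro n
  induction n with
  | zero =>
    intro k0 hn hL hj ha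
    have hk0 : k0 = words.length := by omega
    rw [apw_prof_match, dif_neg (by rintro ⟨h1, -, -⟩; omega)]
    exact ⟨le_rfl, by omega, hj, ha, Or.inl hk0⟩
  | succ n ih =>
    intro k0 hn hL hj ha
    rw [apw_prof_match]
    split
    · rename_i h
      obtain ⟨h1, h2, h3⟩ := h
      have hk0L : k0 < words.length := by exact_mod_cast h1
      have hk0j : k0 < j := by exact_mod_cast h2
      have ha' : pvAgree words corpus j (k0 + 1) := by
        intro t ht
        rcases Nat.lt_succ_iff_lt_or_eq.mp ht with h | h
        · exact ha t h
        · subst h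
          rw [pyGetD_int_sub corpus j t hk0j, pyGetD_int_sub words words.length t hk0L] at h3
          exact h3
      have hrec := ih (k0 + 1) (by omega) (by omega) (by omega) ha'
      exact ⟨by omega, hrec.2.1, hrec.2.2.1, hrec.2.2.2.1, hrec.2.2.2.2⟩
    · rename_i h
      refine ⟨le_rfl, hL, hj, ha, ?_⟩
      by_cases hA : (k0 : Int) < (words.length : Int)
      · by_cases hB : (k0 : Int) < (j : Int)
        · right; right
          intro heq
          exact h ⟨hA, hB, by
            rw [pyGetD_int_sub corpus j k0 (by exact_mod_cast hB),
                pyGetD_int_sub words words.length k0 (by exact_mod_cast hA)]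
            exact heq⟩
        · right; left; omega
      · left; omega

lemma pvM_le (words corpus : List String) (j : Nat) :
    pvM words corpus j ≤ words.length ∧ pvM words corpus j ≤ j := by
  have h := pvMatch_spec words corpus j 0 (Nat.zero_le _) (Nat.zero_le _) (by intro t ht; omega)
  exact ⟨h.2.1, h.2.2.1⟩

lemma agree_iff_le (words corpus : List String) (j k : Nat)
    (hkL : k ≤ words.length) (hkj : k ≤ j) :
    pvAgree words corpus j k ↔ k ≤ pvM words corpus j := by
  have hs := pvMatch_spec words corpus j 0 (Nat.zero_le _) (Nat.zero_le _) (by intro t ht; omega)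
  constructor
  · intro hag
    by_contra hlt
    rw [Nat.not_le] at hlt
    rcases hs.2.2.2.2 with h | h | h
    · unfold pvM at hlt; omega
    · unfold pvM at hlt; omega
    · exact h (hag _ (by unfold pvM at hlt; omega))
  · intro hle t ht
    exact hs.2.2.2.1 t (by unfold pvM at hle; omega)

lemma slice_iff_agree (words corpus : List String) (j k : Nat)
    (hkL : k ≤ words.length) (hkj : k ≤ j) (hjN : j ≤ corpus.length) :
    (corpus.drop (j - k)).take k = words.drop (words.length - k) ↔ pvAgree words corpus j k := by
  have hlen1 : ((corpus.drop (j - k)).take k).length = k := by simp; omega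
  have hlen2 : (words.drop (words.length - k)).length = k := by simp; omega
  constructor
  · intro h t ht
    have e := congrArg (fun l => l.getD (k - 1 - t) "") h
    simp only [List.getD_eq_getElem?_getD] at e
    rw [List.getElem?_take_of_lt (by omega), List.getElem?_drop, List.getElem?_drop] at e
    rw [show j - k + (k - 1 - t) = j - 1 - t by omega,
        show words.length - k + (k - 1 - t) = words.length - 1 - t by omega] at e
    rw [List.getD_eq_getElem?_getD, List.getD_eq_getElem?_getD]
    exact e
  · intro hag
    apply List.ext_getElem?
    intro i
    by_cases hik : i < k
    · rw [List.getElem?_take_of_lt hik, List.getElem?_drop, List.getElem?_drop]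
      have ht := hag (k - 1 - i) (by omega)
      rw [show j - 1 - (k - 1 - i) = j - k + i by omega,
          show words.length - 1 - (k - 1 - i) = words.length - k + i by omega] at ht
      rw [List.getD_eq_getElem corpus "" (by omega), List.getD_eq_getElem words "" (by omega)] at ht
      rw [List.getElem?_eq_getElem (by omega), List.getElem?_eq_getElem (by omega)]
      exact congrArg some ht
    · rw [List.getElem?_eq_none (by omega), List.getElem?_eq_none (by omega)]

-- the slice condition of A's scan characterised by the profile
lemma slice_iff_le (words corpus : List String) (j k : Nat)
    (hkj : k ≤ j) (hjN : j ≤ corpus.length) :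
    ((corpus.drop (j - k)).take k = words.drop (words.length - k)) ↔ k ≤ pvM words corpus j := by
  by_cases hkL : k ≤ words.length
  · rw [slice_iff_agree words corpus j k hkL hkj hjN, agree_iff_le words corpus j k hkL hkj]
  · constructor
    · intro h
      have h1 : ((corpus.drop (j - k)).take k).length = k := by
        simp; omega
      have h2 : (words.drop (words.length - k)).length = words.length := by
        simp; omega
      rw [h] at h1
      omega
    · intro h
      have := (pvM_le words corpus j).1
      omega

-- A's per-level scan produces exactly the counting fold over pvKeys
lemma scanLevel_eq_keys (words corpus : List String) (k : Nat) :
    scanLevel (words.drop (words.length - k)) corpus k = pvCountFold (pvKeys words corpus k) := by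
  by_cases hkN : k ≤ corpus.length
  · have hb : ((corpus.length : Int) - (k : Int)) = ((corpus.length - k : Nat) : Int) := by omega
    unfold scanLevel
    rw [hb, PySem.List.pyRange_zero_natCast, List.foldl_map]
    have hstep : ∀ (acc : PySem.Dict String Int), ∀ i ∈ List.range (corpus.length - k),
        (if PySem.List.slice corpus (some ((i : Nat) : Int)) (some (((i : Nat) : Int) + (k : Int))) == words.drop (words.length - k) then
          (fun w => acc.insert w (acc.getD w 0 + 1)) (PySem.List.pyGetD corpus (((i : Nat) : Int) + (k : Int)) "")
         else acc) =
        (if (fun i => decide (k ≤ pvM words corpus (k + i))) i = true then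
          (fun acc i => acc.insert (corpus.getD (k + i) "") (acc.getD (corpus.getD (k + i) "") 0 + 1)) acc i
         else acc) := by
      intro acc i hi
      rw [List.mem_range] at hi
      have hkey : PySem.List.pyGetD corpus ((i : Int) + (k : Int)) "" = corpus.getD (k + i) "" := by
        rw [show (i : Int) + (k : Int) = ((k + i : Nat) : Int) by push_cast; ring, PySem.List.pyGetD_natCast]
      have hcond : ((corpus.drop i).take k = words.drop (words.length - k)) ↔ k ≤ pvM words corpus (k + i) := by
        have := slice_iff_le words corpus (k + i) k (by omega) (by omega)
        rw [show k + i - k = i by omega] at this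
        exact this
      rw [PySem.List.slice_natCast_add, hkey]
      by_cases hc : k ≤ pvM words corpus (k + i)
      · rw [if_pos (by simpa using hcond.mpr hc), if_pos (by simpa using hc)]
      · rw [if_neg (by simpa using fun h => hc (hcond.mp h)), if_neg (by simpa using hc)]
    rw [PySem.List.foldl_congr_mem _ _ _ _ hstep]
    rw [← List.foldl_filter]
    rw [← List.foldl_map (f := fun i => corpus.getD (k + i) "") (g := fun (d : PySem.Dict String Int) w => d.insert w (d.getD w 0 + 1))]
    unfold pvCountFold pvKeys
    congr 1
    rw [show corpus.length = k + (corpus.length - k) by omega, List.range_add, List.filter_append]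
    rw [show List.filter (fun j => decide (k ≤ pvM words corpus j)) (List.range k) = [] by
      rw [List.filter_eq_nil_iff]
      intro j hj
      rw [List.mem_range] at hj
      have := (pvM_le words corpus j).2
      simp only [decide_eq_true_eq]
      omega]
    rw [List.nil_append, List.filter_map, List.map_map]
    simp only [Function.comp_def, show k + (corpus.length - k) - k = corpus.length - k by omega]
  · push Not at hkN
    unfold scanLevel
    rw [PySem.List.pyRange_one_eq_nil (by omega)]
    rw [show pvKeys words corpus k = [] by
      unfold pvKeys
      rw [show List.filter (fun j => decide (k ≤ pvM words corpus j)) (List.range corpus.length) = [] by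
        rw [List.filter_eq_nil_iff]
        intro j hj
        rw [List.mem_range] at hj
        have := (pvM_le words corpus j).2
        simp only [decide_eq_true_eq]
        omega]
      simp]
    rfl

-- pvCountFold of a nonempty list is a nonempty dict, of [] the empty dict
lemma countFold_size_pos (l : List String) (h : l ≠ []) : 0 < (pvCountFold l).size := by
  obtain ⟨x, t, rfl⟩ := List.exists_cons_of_ne_nil h
  rw [show pvCountFold (x :: t) = PySem.Dict.counter (x :: t) from
    PySem.Dict.foldl_insert_getD_add_one_eq_counter _]
  have hx : x ∈ PySem.Set.ofList (x :: t) := (PySem.Set.mem_ofList _ _).mpr (by simp)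
  have hlen : 0 < (PySem.Set.ofList (x :: t)).length := List.length_pos_of_mem hx
  show 0 < (PySem.Dict.counter (x :: t)).items.length
  rw [PySem.Dict.items_counter]
  simpa using hlen

-- a level below the maximum of the profile has completions; one above has none
lemma keys_ne_nil (words corpus : List String) (kk : Nat)
    (h : ∃ j, j < corpus.length ∧ kk ≤ pvM words corpus j) : pvKeys words corpus kk ≠ [] := by
  obtain ⟨j, hj, hk⟩ := h
  have : corpus.getD j "" ∈ pvKeys words corpus kk :=
    List.mem_map.mpr ⟨j, List.mem_filter.mpr ⟨List.mem_range.mpr hj, by simpa using hk⟩, rfl⟩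
  exact List.ne_nil_of_mem this

lemma keys_eq_nil (words corpus : List String) (kk : Nat)
    (h : ∀ j, j < corpus.length → pvM words corpus j < kk) : pvKeys words corpus kk = [] := by
  unfold pvKeys
  rw [List.filter_eq_nil_iff.mpr (by
    intro j hj
    rw [List.mem_range] at hj
    simp only [decide_eq_true_eq]
    have := h j hj
    omega)]
  simp

-- definitional unfolding of A's while loop
lemma apw_loop_succ (words corpus : List String) (m : Nat) :
    apw_loop words corpus (m + 1) =
      (if (create_dict (if ((m : Int) + 1 == 1) then [] else words) ((m : Int) + 1) corpus).size > 0
       then dictionary_to_list (create_dict (if ((m : Int) + 1 == 1) then [] else words) ((m : Int) + 1) corpus)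
       else apw_loop words corpus m) := rfl

lemma countFold_nil : pvCountFold [] = PySem.Dict.empty := rfl

-- ================= A-side bridge (create_dict = scanLevel) =================

lemma generate_eq_map (corpus : List String) (n : Int) :
    generate_n_grams corpus n =
      (PySem.List.pyRange 0 ((corpus.length : Int) - n + 1) 1).map
        (fun i => PySem.List.slice corpus (some i) (some (i + n))) := by
  unfold generate_n_grams
  split
  · rename_i h
    rw [PySem.List.pyRange_one_eq_nil (by omega)]
    simp
  · exact PySem.List.foldl_append_singleton_eq_map _ _ []

lemma create_dict_eq_foldl (words : List String) (n : Int) (corpus : List String) :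
    create_dict words n corpus =
      (relevant_n_grams words n corpus).foldl (fun worddict n_gram =>
        match PySem.List.pyGet? n_gram (-1) with
        | some currkey =>
            if worddict.contains currkey then worddict.insert currkey (worddict.getD currkey 0 + 1)
            else worddict.insert currkey (1 : Int)
        | none => worddict) PySem.Dict.empty := by
  by_cases h : relevant_n_grams words n corpus = []
  · simp [create_dict, h]
  · simp [create_dict, h]

lemma dict_level (w ctx : List String) (corpus : List String) (k : Nat)
    (hctx : PySem.List.slice w (some (1 - ((k : Int) + 1))) none = ctx) :
    create_dict w ((k : Int) + 1) corpus = scanLevel ctx corpus k := by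
  rw [create_dict_eq_foldl]
  unfold relevant_n_grams
  rw [generate_eq_map corpus ((k : Int) + 1)]
  simp only [List.foldl_filter, List.foldl_map]
  unfold scanLevel
  rw [show ((corpus.length : Int) - ((k : Int) + 1) + 1) = ((corpus.length : Int) - (k : Int)) by ring]
  apply PySem.List.foldl_congr_mem
  intro acc i hi
  rw [PySem.List.mem_pyRange_one] at hi
  obtain ⟨h0, h1⟩ := hi
  have hmk : i.toNat + (k + 1) ≤ corpus.length := by omega
  have hgram : PySem.List.slice corpus (some i) (some (i + ((k : Int) + 1)))
      = (corpus.drop i.toNat).take (k + 1) := by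
    rw [PySem.List.slice_toNat corpus h0 (by omega)]
    congr 1
    omega
  have hlen : ((corpus.drop i.toNat).take (k + 1)).length = k + 1 := by
    simp; omega
  have hcondA : PySem.List.slice (PySem.List.slice corpus (some i) (some (i + ((k : Int) + 1))))
      none (some (((k : Int) + 1) - 1)) = (corpus.drop i.toNat).take k := by
    rw [hgram, show (((k : Int) + 1) - 1) = ((k : Nat) : Int) by ring,
        PySem.List.slice_to _ (by omega)]
    simp [List.take_take]
  have hcondB : PySem.List.slice corpus (some i) (some (i + (k : Int)))
      = (corpus.drop i.toNat).take k := by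
    rw [PySem.List.slice_toNat corpus h0 (by omega)]
    congr 1
    omega
  have hkeyA : PySem.List.pyGet? (PySem.List.slice corpus (some i) (some (i + ((k : Int) + 1)))) (-1)
      = some (corpus[i.toNat + k]'(by omega)) := by
    rw [hgram, PySem.List.pyGet?_neg_one, List.getLast?_eq_getElem?, hlen]
    simp only [Nat.add_sub_cancel]
    rw [List.getElem?_take_of_lt (by omega), List.getElem?_drop]
    exact List.getElem?_eq_getElem (by omega)
  have hkeyB : PySem.List.pyGetD corpus (i + (k : Int)) ""
      = corpus[i.toNat + k]'(by omega) := by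
    rw [PySem.List.pyGetD_eq_getElem corpus "" (by omega) (by omega)]
    congr 1
    omega
  rw [hkeyA, hkeyB, hcondA, hcondB, hctx]
  by_cases hmem : acc.contains (corpus[i.toNat + k]'(by omega)) = true
  · simp only [hmem, if_true]
  · simp only [Bool.not_eq_true] at hmem
    simp [hmem, PySem.Dict.getD_of_not_contains acc 0 hmem]

-- dictionary_to_list as B writes the expansion
lemma expand_eq (d : PySem.Dict String Int) :
    dictionary_to_list d =
      d.items.flatMap (fun kv => (PySem.List.pyRange 0 kv.2 1).map (fun _ => kv.1)) := by
  unfold dictionary_to_list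
  rw [PySem.List.foldl_append_eq_flatMap (fun kv => List.replicate kv.2.toNat kv.1) d.items []]
  simp only [List.nil_append]
  congr 1
  funext kv
  have : (PySem.List.pyRange 0 kv.2 1).map (fun _ => kv.1)
      = List.replicate (PySem.List.pyRange 0 kv.2 1).length kv.1 := List.map_const
  rw [this, PySem.List.length_pyRange_one]
  simp

-- A's backoff loop stops exactly at level `best` and returns its tally
lemma loopA (words corpus : List String) (best : Nat)
    (hbd : ∀ j, j < corpus.length → pvM words corpus j ≤ best)
    (hex : ∃ j, j < corpus.length ∧ best ≤ pvM words corpus j) :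
    ∀ k, best ≤ k → apw_loop words corpus (k + 1) = dictionary_to_list (pvCountFold (pvKeys words corpus best)) := by
  intro k
  induction k with
  | zero =>
    intro hb
    have hb0 : best = 0 := by omega
    subst hb0
    rw [apw_loop_succ]
    rw [show (if (((0 : Nat) : Int) + 1 == 1) then ([] : List String) else words) = [] by norm_num]
    rw [dict_level ([] : List String) (words.drop (words.length - 0)) corpus 0 (by
      rw [show words.drop (words.length - 0) = [] by simp]
      simp [PySem.List.slice_some_none])]
    rw [scanLevel_eq_keys words corpus 0]
    rw [if_pos (countFold_size_pos _ (keys_ne_nil words corpus 0 hex))]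
  | succ k ih =>
    intro hb
    rw [apw_loop_succ]
    rw [show (if (((k + 1 : Nat) : Int) + 1 == 1) then ([] : List String) else words) = words by
      rw [if_neg]; simp; omega]
    rw [dict_level words (words.drop (words.length - (k + 1))) corpus (k + 1) (by
      rw [show (1 - (((k + 1 : Nat) : Int) + 1)) = -((k + 1 : Nat) : Int) by push_cast; ring]
      rw [PySem.List.slice_from_neg_natCast words (k + 1) (by omega)])]
    rw [scanLevel_eq_keys words corpus (k + 1)]
    by_cases hbe : best = k + 1
    · subst hbe
      rw [if_pos (countFold_size_pos _ (keys_ne_nil words corpus (k + 1) hex))]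
    · rw [show pvKeys words corpus (k + 1) = [] from
        keys_eq_nil words corpus (k + 1) (fun j hj => by have := hbd j hj; omega)]
      rw [countFold_nil]
      rw [if_neg (by simp [PySem.Dict.size_empty])]
      exact ih (by omega)

-- ===== VERDICT (by name: the statement is the Claim_ definition above) =====
theorem all_possible_words_spec : Claim_equal_all_possible_words := by
  intro words corpus _hd hpre
  unfold Spec_all_possible_words all_possible_words all_possible_words_alt
  dsimp only
  have hN : 0 < corpus.length := List.length_pos_of_ne_nil hpre
  have hprof : (PySem.List.pyRange 0 ((corpus.length : Int)) 1).foldl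
      (fun acc j => acc ++ [apw_prof_match words corpus j ((words.length : Int)) 0]) []
      = (PySem.List.pyRange 0 ((corpus.length : Int)) 1).map
        (fun j => apw_prof_match words corpus j ((words.length : Int)) 0) := by
    rw [PySem.List.foldl_append_singleton_eq_map]
    simp
  rcases hmax : PySem.List.max? ((PySem.List.pyRange 0 ((corpus.length : Int)) 1).foldl
      (fun acc j => acc ++ [apw_prof_match words corpus j ((words.length : Int)) 0]) [])
      (fun x => x) with _ | best
  · exfalso
    have := (PySem.List.max?_eq_none_iff _ _).mp hmax
    rw [hprof] at this
    have hl := congrArg List.length this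
    rw [List.length_map, PySem.List.length_pyRange_one] at hl
    simp only [List.length_nil] at hl
    omega
  · dsimp only
    have hmem := PySem.List.max?_mem hmax
    have hismax := PySem.List.max?_isMax hmax
    rw [hprof] at hmem hismax
    have hbd : ∀ j, j < corpus.length → pvM words corpus j ≤ best := by
      intro j hj
      exact hismax _ (List.mem_map.mpr ⟨(j : Int), by
        rw [PySem.List.mem_pyRange_one]
        omega, rfl⟩)
    have hex : ∃ j, j < corpus.length ∧ best ≤ pvM words corpus j := by
      obtain ⟨jI, hjI, hje⟩ := List.mem_map.mp hmem
      rw [PySem.List.mem_pyRange_one] at hjI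
      refine ⟨jI.toNat, by omega, ?_⟩
      unfold pvM
      rw [show ((jI.toNat : Nat) : Int) = jI by omega, hje]
    have hbL : best ≤ words.length := by
      obtain ⟨j, hj, hk⟩ := hex
      have := (pvM_le words corpus j).1
      omega
    have hcounts : (PySem.List.pyRange 0 ((corpus.length : Int)) 1).foldl
        (fun counts j =>
          if best ≤ PySem.List.pyGetD ((PySem.List.pyRange 0 ((corpus.length : Int)) 1).foldl
              (fun acc j => acc ++ [apw_prof_match words corpus j ((words.length : Int)) 0]) []) j 0 then
            counts.insert (PySem.List.pyGetD corpus j "")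
              (counts.getD (PySem.List.pyGetD corpus j "") 0 + 1)
          else counts) PySem.Dict.empty = pvCountFold (pvKeys words corpus best) := by
      rw [hprof]
      set prof2 := (PySem.List.pyRange 0 ((corpus.length : Int)) 1).map
        (fun j => apw_prof_match words corpus j ((words.length : Int)) 0) with hprof2
      rw [PySem.List.pyRange_zero_natCast, List.foldl_map]
      have hstep : ∀ (acc : PySem.Dict String Int), ∀ j ∈ List.range corpus.length,
          (if best ≤ PySem.List.pyGetD prof2 ((j : Nat) : Int) 0 then
            acc.insert (PySem.List.pyGetD corpus ((j : Nat) : Int) "")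
              (acc.getD (PySem.List.pyGetD corpus ((j : Nat) : Int) "") 0 + 1)
          else acc) =
          (if (fun j => decide (best ≤ pvM words corpus j)) j = true then
            (fun (acc : PySem.Dict String Int) j => acc.insert (corpus.getD j "")
              (acc.getD (corpus.getD j "") 0 + 1)) acc j
          else acc) := by
        intro acc j hj
        rw [List.mem_range] at hj
        rw [hprof2, PySem.List.pyGetD_map_pyRange _ corpus.length j 0 hj,
            PySem.List.pyGetD_natCast]
        simp only [decide_eq_true_eq]
        rfl
      rw [PySem.List.foldl_congr_mem _ _ _ _ hstep]
      rw [← List.foldl_filter]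
      rw [← List.foldl_map (f := fun j => corpus.getD j "")
        (g := fun (d : PySem.Dict String Int) w => d.insert w (d.getD w 0 + 1))]
      rfl
    rw [hcounts]
    rw [loopA words corpus best hbd hex words.length hbL]
    rw [expand_eq]
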